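-- pv_equiv track=rewrite | github.com/teriflix/scrite | tools/qml/enforce_qml_ids.py | mask_comments_and_strings
-- ===== SOURCE A (Python) =====
-- def mask_comments_and_strings(text: str) -> str:
--     chars = list(text)
--     out = chars[:]
--     state = "normal"
--     quote = ""
--     i = 0
--     while i < len(chars):
--         ch = chars[i]
--         nxt = chars[i + 1] if i + 1 < len(chars) else ""
--
--         if state == "normal":
--             if ch == "/" and nxt == "/":
--                 out[i] = " "
--                 out[i + 1] = " "
--                 i += 2
--                 state = "line_comment"
--                 continue
--             if ch == "/" and nxt == "*":
--                 out[i] = " "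
--                 out[i + 1] = " "
--                 i += 2
--                 state = "block_comment"
--                 continue
--             if ch in ('"', "'", "`"):
--                 quote = ch
--                 out[i] = " "
--                 i += 1
--                 state = "string"
--                 continue
--             i += 1
--             continue
--
--         if state == "line_comment":
--             if ch == "\n":
--                 state = "normal"
--             else:
--                 out[i] = " "
--             i += 1
--             continue
--
--         if state == "block_comment":
--             if ch == "*" and nxt == "/":
--                 out[i] = " "
--                 out[i + 1] = " "
--                 i += 2
--                 state = "normal"
--             else:
--                 if ch != "\n":
--                     out[i] = " "
--                 i += 1
--             continue
--
--         if state == "string":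
--             if ch == "\\":
--                 out[i] = " "
--                 if i + 1 < len(chars):
--                     if chars[i + 1] != "\n":
--                         out[i + 1] = " "
--                 i += 2
--                 continue
--             if ch == quote:
--                 out[i] = " "
--                 i += 1
--                 state = "normal"
--                 continue
--             if ch != "\n":
--                 out[i] = " "
--             i += 1
--             continue
--
--     return "".join(out)
-- ===== SOURCE B (Python) =====
-- # B: instead of one four-state state-machine loop, an outer scanner over normal
-- # text delegates each comment/string region to a dedicated helper that blanks
-- # it and returns the resume index.
--
-- def _scan_line(chars, i, out):
--     n = len(chars)
--     while i < n:
--         if chars[i] == '\n':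
--             out.append('\n')
--             return i + 1
--         out.append(' ')
--         i += 1
--     return i
--
--
-- def _scan_block(chars, i, out):
--     n = len(chars)
--     while i < n:
--         if chars[i] == '*' and i + 1 < n and chars[i + 1] == '/':
--             out.append(' ')
--             out.append(' ')
--             return i + 2
--         out.append(chars[i] if chars[i] == '\n' else ' ')
--         i += 1
--     return i
--
--
-- def _scan_string(chars, i, quote, out):
--     n = len(chars)
--     while i < n:
--         c = chars[i]
--         if c == '\\':
--             out.append(' ')
--             if i + 1 < n:
--                 out.append(chars[i + 1] if chars[i + 1] == '\n' else ' ')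
--             i += 2
--         elif c == quote:
--             out.append(' ')
--             return i + 1
--         else:
--             out.append(c if c == '\n' else ' ')
--             i += 1
--     return i
--
--
-- def mask_comments_and_strings(text: str) -> str:
--     chars = list(text)
--     n = len(chars)
--     out = []
--     i = 0
--     while i < n:
--         ch = chars[i]
--         if ch == '/' and i + 1 < n and chars[i + 1] == '/':
--             out.append(' ')
--             out.append(' ')
--             i = _scan_line(chars, i + 2, out)
--         elif ch == '/' and i + 1 < n and chars[i + 1] == '*':
--             out.append(' ')
--             out.append(' ')
--             i = _scan_block(chars, i + 2, out)
--         elif ch in ('"', "'", '`'):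
--             out.append(' ')
--             i = _scan_string(chars, i + 1, ch, out)
--         else:
--             out.append(ch)
--             i += 1
--     return ''.join(out)
-- ===== Notes on version B (the rewrite author's own statement) =====
-- stated objective: alternative
-- what changed: A's single while loop driven by a four-valued state variable is replaced by an outer scanner over normal text that delegates each comment/string region to a dedicated helper (_scan_line/_scan_block/_scan_string) which blanks the region and returns the resume position.
import Mathlib
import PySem

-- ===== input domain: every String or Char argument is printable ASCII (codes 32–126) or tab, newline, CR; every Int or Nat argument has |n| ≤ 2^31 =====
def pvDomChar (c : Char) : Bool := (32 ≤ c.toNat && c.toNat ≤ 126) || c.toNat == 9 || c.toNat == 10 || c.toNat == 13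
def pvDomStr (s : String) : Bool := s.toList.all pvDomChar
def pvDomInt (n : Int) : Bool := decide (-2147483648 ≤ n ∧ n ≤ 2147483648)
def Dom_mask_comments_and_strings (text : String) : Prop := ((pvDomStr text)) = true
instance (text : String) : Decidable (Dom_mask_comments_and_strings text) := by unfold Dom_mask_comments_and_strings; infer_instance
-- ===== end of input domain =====

-- B replaces A's single four-state state-machine loop by an outer scanner that
-- delegates each comment/string region to a dedicated helper (objective: alternative decomposition).

-- ===== PORT A =====
-- A's state variable, literally.
inductive MaskSt : Type
  | normal | lineComment | blockComment | strLit
  deriving DecidableEq, Repr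

-- A's while loop over the index, as the structural recursion over the same
-- state: the current suffix of `chars` plays the role of index `i`, `nxt` is
-- the lookahead (Python's "" sentinel becomes `none`), writes `out[i] = ' '`
-- become the emitted characters for the consumed positions.
def maskLoopA (st : MaskSt) (q : Char) (l : List Char) : List Char :=
  match l with
  | [] => []
  | c :: rest =>
    match st with
    | .normal =>
      if c = '/' ∧ rest.head? = some '/' then
        ' ' :: ' ' :: maskLoopA .lineComment q rest.tail
      else if c = '/' ∧ rest.head? = some '*' then
        ' ' :: ' ' :: maskLoopA .blockComment q rest.tail
      else if c = '"' ∨ c = '\'' ∨ c = '`' then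
        ' ' :: maskLoopA .strLit c rest
      else
        c :: maskLoopA .normal q rest
    | .lineComment =>
      if c = '\n' then c :: maskLoopA .normal q rest
      else ' ' :: maskLoopA .lineComment q rest
    | .blockComment =>
      if c = '*' ∧ rest.head? = some '/' then
        ' ' :: ' ' :: maskLoopA .normal q rest.tail
      else
        (if c = '\n' then c else ' ') :: maskLoopA .blockComment q rest
    | .strLit =>
      if c = '\\' then
        match rest with
        | d :: rest' => ' ' :: (if d = '\n' then d else ' ') :: maskLoopA .strLit q rest'
        | [] => [' ']
      else if c = q then ' ' :: maskLoopA .normal q rest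
      else (if c = '\n' then c else ' ') :: maskLoopA .strLit q rest
termination_by l.length
decreasing_by all_goals (simp_all [List.length_tail]; try omega)

def mask_comments_and_strings (text : String) : String :=
  String.ofList (maskLoopA .normal ' ' text.toList)  -- quote starts unset ("" in A); never read before set

-- ===== PORT B =====
-- B's helpers: each consumes one region from the suffix, returning the masked
-- segment (Python appends to `out`) and the remaining suffix (Python's resume index).
def scanLineB (l : List Char) : List Char × List Char :=
  match l with
  | [] => ([], [])
  | c :: rest =>
    if c = '\n' then (['\n'], rest)
    else let p := scanLineB rest; (' ' :: p.1, p.2)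

def scanBlockB (l : List Char) : List Char × List Char :=
  match l with
  | [] => ([], [])
  | c :: rest =>
    if c = '*' ∧ rest.head? = some '/' then ([' ', ' '], rest.tail)
    else let p := scanBlockB rest; ((if c = '\n' then c else ' ') :: p.1, p.2)
termination_by l.length
decreasing_by all_goals (simp; try omega)

def scanStringB (quote : Char) (l : List Char) : List Char × List Char :=
  match l with
  | [] => ([], [])
  | c :: rest =>
    if c = '\\' then
      match rest with
      | d :: rest' =>
        let p := scanStringB quote rest'
        (' ' :: (if d = '\n' then d else ' ') :: p.1, p.2)
      | [] => ([' '], [])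
    else if c = quote then ([' '], rest)
    else let p := scanStringB quote rest; ((if c = '\n' then c else ' ') :: p.1, p.2)

-- remainder bounds, cited by `maskOuterB`'s decreasing_by
theorem scanLineB_snd_le : ∀ l : List Char, (scanLineB l).2.length ≤ l.length
  | [] => by simp [scanLineB]
  | c :: rest => by
    by_cases h : c = '\n'
    · simp [scanLineB, h]
    · have := scanLineB_snd_le rest
      simp [scanLineB, h]; omega

theorem scanBlockB_snd_le : ∀ l : List Char, (scanBlockB l).2.length ≤ l.length
  | [] => by simp [scanBlockB]
  | c :: rest => by
    by_cases h : c = '*' ∧ rest.head? = some '/'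
    · have := List.length_tail (l := rest)
      simp [scanBlockB, h.1, h.2]; omega
    · have := scanBlockB_snd_le rest
      simp [scanBlockB, h]; omega

theorem scanStringB_snd_le (quote : Char) : ∀ l : List Char, (scanStringB quote l).2.length ≤ l.length
  | [] => by simp [scanStringB]
  | c :: rest => by
    cases rest with
    | nil =>
      by_cases h : c = '\\'
      · simp [scanStringB, h]
      · by_cases hq : c = quote
        · have h' : ¬ quote = '\\' := hq ▸ h
          simp [scanStringB, h, hq, h']
        · simp [scanStringB, h, hq]
    | cons d rest' =>
      by_cases h : c = '\\'
      · have := scanStringB_snd_le quote rest'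
        simp [scanStringB, h]; omega
      · by_cases hq : c = quote
        · have h' : ¬ quote = '\\' := hq ▸ h
          simp [scanStringB, h, hq, h']
        · have hle : (scanStringB quote (d :: rest')).2.length ≤ rest'.length + 1 := by
            simpa using scanStringB_snd_le quote (d :: rest')
          simp [scanStringB, h, hq]; omega

-- B's outer while loop over normal text.
def maskOuterB (l : List Char) : List Char :=
  match l with
  | [] => []
  | c :: rest =>
    if c = '/' ∧ rest.head? = some '/' then
      let p := scanLineB rest.tail
      ' ' :: ' ' :: (p.1 ++ maskOuterB p.2)
    else if c = '/' ∧ rest.head? = some '*' then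
      let p := scanBlockB rest.tail
      ' ' :: ' ' :: (p.1 ++ maskOuterB p.2)
    else if c = '"' ∨ c = '\'' ∨ c = '`' then
      let p := scanStringB c rest
      ' ' :: (p.1 ++ maskOuterB p.2)
    else
      c :: maskOuterB rest
termination_by l.length
decreasing_by
  · have h1 := scanLineB_snd_le rest.tail
    have h2 := List.length_tail (l := rest)
    simp; omega
  · have h1 := scanBlockB_snd_le rest.tail
    have h2 := List.length_tail (l := rest)
    simp; omega
  · have h1 := scanStringB_snd_le c rest
    simp; omega
  · simp

def mask_comments_and_strings_alt (text : String) : String :=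
  String.ofList (maskOuterB text.toList)

-- ===== PRECONDITION & SPEC =====
def Spec_mask_comments_and_strings (text : String) (out : String) : Prop := out = mask_comments_and_strings_alt text
instance (text : String) (out : String) : Decidable (Spec_mask_comments_and_strings text out) := by unfold Spec_mask_comments_and_strings; infer_instance

-- ===== CLAIM (what is proved, stated in full; the proofs are below) =====
def Claim_equal_mask_comments_and_strings : Prop := ∀ (text : String), Dom_mask_comments_and_strings text → Spec_mask_comments_and_strings text (mask_comments_and_strings text)

-- ===== LEMMAS AND PROOFS =====
theorem mask_main : ∀ (n : Nat) (l : List Char), l.length ≤ n → ∀ q : Char,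
    maskLoopA .normal q l = maskOuterB l ∧
    maskLoopA .lineComment q l = (scanLineB l).1 ++ maskOuterB (scanLineB l).2 ∧
    maskLoopA .blockComment q l = (scanBlockB l).1 ++ maskOuterB (scanBlockB l).2 ∧
    maskLoopA .strLit q l = (scanStringB q l).1 ++ maskOuterB (scanStringB q l).2 := by
  intro n
  induction n with
  | zero =>
    intro l hl q
    have hnil : l = [] := List.eq_nil_of_length_eq_zero (Nat.le_zero.mp hl)
    subst hnil
    simp [maskLoopA, maskOuterB, scanLineB, scanBlockB, scanStringB]
  | succ n ih =>
    intro l hl q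
    cases l with
    | nil => simp [maskLoopA, maskOuterB, scanLineB, scanBlockB, scanStringB]
    | cons c rest =>
      cases rest with
      | nil =>
        refine ⟨?_, ?_, ?_, ?_⟩
        · by_cases h3 : c = '"' ∨ c = '\'' ∨ c = '`'
          · simp [maskLoopA, maskOuterB, scanStringB, h3]
          · simp [maskLoopA, maskOuterB, h3]
        · by_cases h : c = '\n'
          · simp [maskLoopA, maskOuterB, scanLineB, h]
          · simp [maskLoopA, maskOuterB, scanLineB, h]
        · simp [maskLoopA, maskOuterB, scanBlockB]
        · by_cases h : c = '\\'
          · simp [maskLoopA, scanStringB, maskOuterB, h]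
          · by_cases hq : c = q
            · have h' : ¬ q = '\\' := hq ▸ h
              simp [maskLoopA, scanStringB, maskOuterB, h, hq, h']
            · simp [maskLoopA, scanStringB, maskOuterB, h, hq]
      | cons d rest' =>
        have hr : rest'.length + 1 ≤ n := by simp at hl; omega
        have hr' : rest'.length ≤ n := by omega
        refine ⟨?_, ?_, ?_, ?_⟩
        · -- normal state
          by_cases h1 : c = '/' ∧ d = '/'
          · simp [maskLoopA, maskOuterB, h1.1, h1.2, (ih rest' hr' q).2.1]
          · by_cases h2 : c = '/' ∧ d = '*'
            · simp [maskLoopA, maskOuterB, h1, h2.1, h2.2, (ih rest' hr' q).2.2.1]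
            · by_cases h3 : c = '"' ∨ c = '\'' ∨ c = '`'
              · simp [maskLoopA, maskOuterB, h1, h2, h3, (ih (d :: rest') hr c).2.2.2]
              · simp [maskLoopA, maskOuterB, h1, h2, h3, (ih (d :: rest') hr q).1]
        · -- line comment state
          by_cases h : c = '\n'
          · simp [maskLoopA, scanLineB, h, (ih (d :: rest') hr q).1]
          · simp [maskLoopA, scanLineB, h, (ih (d :: rest') hr q).2.1]
        · -- block comment state
          by_cases h : c = '*' ∧ d = '/'
          · simp [maskLoopA, maskOuterB, scanBlockB, h.1, h.2, (ih rest' hr' q).1]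
          · simp [maskLoopA, maskOuterB, scanBlockB, h, (ih (d :: rest') hr q).2.2.1]
        · -- string state
          by_cases h : c = '\\'
          · simp [maskLoopA, scanStringB, h, (ih rest' hr' q).2.2.2]
          · by_cases hq : c = q
            · have h' : ¬ q = '\\' := hq ▸ h
              simp [maskLoopA, scanStringB, h, hq, h', (ih (d :: rest') hr q).1]
            · simp [maskLoopA, scanStringB, h, hq, (ih (d :: rest') hr q).2.2.2]

theorem mask_normal_eq (l : List Char) (q : Char) : maskLoopA .normal q l = maskOuterB l :=
  (mask_main l.length l le_rfl q).1

-- ===== VERDICT (by name: the statement is the Claim_ definition above) =====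
theorem mask_comments_and_strings_spec : Claim_equal_mask_comments_and_strings := by
  intro text _
  unfold Spec_mask_comments_and_strings mask_comments_and_strings mask_comments_and_strings_alt
  exact congrArg String.ofList (mask_normal_eq text.toList ' ')
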